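-- pv_equiv track=rewrite | github.com/priest-2105/Sentra | engine/scanners/secrets.py | _is_env_file
-- ===== SOURCE A (Python) =====
-- def _is_env_file(rel_path: str) -> bool:
--     """Return True if this looks like a committed .env file (not example/template)."""
--     filename = rel_path.split("/")[-1].lower()
--     if not filename.startswith(".env"):
--         return False
--     # Allow .env.example, .env.sample, .env.template, .env.local.example
--     excluded_suffixes = ("example", "sample", "template")
--     remainder = filename[4:]  # after ".env"
--     if not remainder:
--         return True
--     if remainder.startswith("."):
--         suffix = remainder[1:].lower()
--         return not any(suffix.startswith(s) for s in excluded_suffixes)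
--     return False
-- ===== SOURCE B (Python) =====
-- def _is_env_file(rel_path: str) -> bool:
--     """Dot-split the basename and judge the segments positionally."""
--     parts = rel_path.split("/")[-1].lower().split(".")
--     if len(parts) < 2 or parts[0] != "" or parts[1] != "env":
--         return False
--     return len(parts) == 2 or not parts[2].startswith(("example", "sample", "template"))
-- ===== Notes on version B (the rewrite author's own statement) =====
-- stated objective: alternative
-- what changed: Instead of A's startswith('.env') followed by slicing the remainder and prefix-testing it against each excluded word, B splits the lowercased basename on '.' once and judges the segments positionally: segment 0 must be empty, segment 1 must be 'env', and either there is no third segment or it does not start with an excluded word.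
import Mathlib
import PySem

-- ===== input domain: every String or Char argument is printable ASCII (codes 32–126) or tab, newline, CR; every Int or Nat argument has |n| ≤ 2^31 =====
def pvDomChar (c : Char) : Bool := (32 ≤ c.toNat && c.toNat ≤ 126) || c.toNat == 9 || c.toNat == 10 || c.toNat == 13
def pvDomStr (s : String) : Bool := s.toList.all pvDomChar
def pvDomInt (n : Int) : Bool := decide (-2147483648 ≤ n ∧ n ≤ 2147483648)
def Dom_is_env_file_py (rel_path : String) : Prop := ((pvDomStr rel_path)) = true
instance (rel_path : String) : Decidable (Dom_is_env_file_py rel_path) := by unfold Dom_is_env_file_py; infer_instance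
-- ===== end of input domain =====

-- B re-implements the ".env but not example/sample/template" test by splitting the basename
-- on "." and judging the segments positionally, instead of A's prefix tests and slicing (objective: alternative).

-- ===== PORT A =====
def is_env_file_py (rel_path : String) : Bool :=
  let filename := PySem.Str.lower (PySem.List.pyGetD ((PySem.Str.split? rel_path "/").getD []) (-1) "")
  if !(PySem.Str.startswith filename ".env") then false
  else
    let remainder := PySem.Str.slice filename (some 4) none
    if remainder = "" then true
    else if PySem.Str.startswith remainder "." then
      let suffix := PySem.Str.lower (PySem.Str.slice remainder (some 1) none)
      !(["example", "sample", "template"].any (fun s => PySem.Str.startswith suffix s))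
    else false

-- ===== PORT B =====
def is_env_file_py_alt (rel_path : String) : Bool :=
  let parts := (PySem.Str.split? (PySem.Str.lower (PySem.List.pyGetD ((PySem.Str.split? rel_path "/").getD []) (-1) "")) ".").getD []
  if parts.length < 2 || PySem.List.pyGetD parts 0 "" != "" || PySem.List.pyGetD parts 1 "" != "env" then
    false
  else
    parts.length == 2 ||
      !(PySem.Str.startswith (PySem.List.pyGetD parts 2 "") "example" ||
        PySem.Str.startswith (PySem.List.pyGetD parts 2 "") "sample" ||
        PySem.Str.startswith (PySem.List.pyGetD parts 2 "") "template")

-- ===== PRECONDITION & SPEC =====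
def Spec_is_env_file_py (rel_path : String) (out : Bool) : Prop := out = is_env_file_py_alt rel_path
instance (rel_path : String) (out : Bool) : Decidable (Spec_is_env_file_py rel_path out) := by unfold Spec_is_env_file_py; infer_instance

-- ===== CLAIM (what is proved, stated in full; the proofs are below) =====
def Claim_equal_is_env_file_py : Prop := ∀ (rel_path : String), Dom_is_env_file_py rel_path → Spec_is_env_file_py rel_path (is_env_file_py rel_path)

-- ===== LEMMAS AND PROOFS =====
def mapHd (f : List Char → List Char) : List (List Char) → List (List Char)
  | [] => []
  | h :: t => f h :: t

def mySplit : List Char → List (List Char)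
  | [] => [[]]
  | c :: t => if c = '.' then [] :: mySplit t else mapHd (c :: ·) (mySplit t)

theorem mySplit_head (l : List Char) :
    ∃ tl, mySplit l = l.takeWhile (fun x => !decide (x = '.')) :: tl := by
  induction l with
  | nil => exact ⟨[], rfl⟩
  | cons c t ih =>
    obtain ⟨tl, htl⟩ := ih
    by_cases hc : c = '.'
    · subst hc; exact ⟨mySplit t, by simp [mySplit]⟩
    · exact ⟨tl, by simp [mySplit, hc, htl, mapHd]⟩

theorem mySplit_no_dot (l : List Char) (h : '.' ∉ l) : mySplit l = [l] := by
  induction l with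
  | nil => rfl
  | cons c t ih =>
    simp at h
    simp [mySplit, Ne.symm h.1, ih h.2, mapHd]

theorem mySplit_pre_dot (pre t : List Char) (h : '.' ∉ pre) :
    mySplit (pre ++ '.' :: t) = pre :: mySplit t := by
  induction pre with
  | nil => simp [mySplit]
  | cons c p ih =>
    simp at h
    simp [mySplit, Ne.symm h.1, ih h.2, mapHd]

theorem go_spec (l : List Char) : ∀ (fuel : Nat) (cur : List Char) (acc : List (List Char)),
    l.length < fuel →
    PySem.Chars.splitOn.go ['.'] fuel l cur acc
      = acc.reverse ++ mapHd (cur.reverse ++ ·) (mySplit l) := by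
  induction l with
  | nil =>
    intro fuel cur acc h
    match fuel with
    | f + 1 => rw [PySem.Chars.splitOn.go.eq_def]; simp [mySplit, mapHd]
  | cons c t ih =>
    intro fuel cur acc h
    match fuel with
    | f + 1 =>
      rw [PySem.Chars.splitOn.go.eq_def]
      by_cases hc : c = '.'
      · subst hc
        have hpre : ['.'].isPrefixOf ('.' :: t) = true := by simp [List.isPrefixOf]
        simp only [hpre, if_pos]
        have hdrop : List.drop (['.'] : List Char).length ('.' :: t) = t := rfl
        rw [hdrop, ih f [] (cur.reverse :: acc) (by simpa using h)]
        obtain ⟨tl, htl⟩ := mySplit_head t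
        simp [mySplit, htl, mapHd]
      · have hpre : ['.'].isPrefixOf (c :: t) = false := by
          simp [List.isPrefixOf]; exact fun hh => absurd hh.symm hc
        simp only [hpre, Bool.false_eq_true, if_neg, not_false_eq_true]
        rw [ih f (c :: cur) acc (by simpa using h)]
        obtain ⟨tl, htl⟩ := mySplit_head t
        simp [mySplit, hc, htl, mapHd]

theorem splitOn_dot (l : List Char) : PySem.Chars.splitOn l ['.'] = mySplit l := by
  unfold PySem.Chars.splitOn
  rw [go_spec l (l.length + 1) [] [] (by omega)]
  obtain ⟨tl, htl⟩ := mySplit_head l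
  simp [htl, mapHd]

theorem parts_eq (s : String) :
    ((PySem.Str.split? s ".").getD []) = (mySplit s.toList).map String.ofList := by
  have : (".").toList = ['.'] := by decide
  simp [PySem.Str.split?, PySem.Chars.split?, this, splitOn_dot]

theorem lowerChar_idem (c : Char) :
    PySem.Chars.lowerChar (PySem.Chars.lowerChar c) = PySem.Chars.lowerChar c := by
  unfold PySem.Chars.lowerChar PySem.Chars.isupper
  by_cases h : 'A' ≤ c ∧ c ≤ 'Z'
  · have h1 : 65 ≤ c.toNat := h.1
    have h2 : c.toNat ≤ 90 := h.2
    have hv : (c.toNat + 32).isValidChar := by left; omega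
    have ht : (Char.ofNat (c.toNat + 32)).toNat = c.toNat + 32 := by
      simp [Char.ofNat, hv]
    have hz : ¬ (Char.ofNat (c.toNat + 32) ≤ 'Z') := by
      intro hle
      have : (Char.ofNat (c.toNat + 32)).toNat ≤ 90 := hle
      omega
    simp [h.1, h.2, hz]
  · have hcond : (decide ('A' ≤ c) && decide (c ≤ 'Z')) = false := by
      rcases not_and_or.mp h with h' | h' <;> simp [h']
    simp [hcond]

theorem prefix_takeWhile (w : List Char) (hw : '.' ∉ w) :
    ∀ u : List Char, (w <+: u ↔ w <+: u.takeWhile (fun x => !decide (x = '.'))) := by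
  induction w with
  | nil => simp
  | cons a w' ih =>
    intro u
    simp at hw
    match u with
    | [] => simp
    | b :: u' =>
      by_cases hb : b = '.'
      · subst hb
        simp [List.cons_prefix_cons]
        intro hab; exact absurd hab.symm hw.1
      · simp [List.takeWhile_cons, hb, List.cons_prefix_cons, ih hw.2 u']

theorem lower_fixed (xs : List Char) :
    ∀ c ∈ PySem.Chars.lower xs, PySem.Chars.lowerChar c = c := by
  intro c hc
  simp [PySem.Chars.lower] at hc
  obtain ⟨a, _, rfl⟩ := hc
  exact lowerChar_idem a

theorem lower_of_fixed (u : List Char) (h : ∀ c ∈ u, PySem.Chars.lowerChar c = c) :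
    PySem.Chars.lower u = u := by
  exact List.map_congr_left (fun c hc => h c hc) |>.trans (List.map_id _)

theorem ofList_eq_empty_iff (r : List Char) : (String.ofList r = "") ↔ r = [] := by
  constructor
  · intro h
    have := congrArg String.toList h
    simpa using this
  · rintro rfl; rfl

theorem ofList_inj {a b : List Char} (h : String.ofList a = String.ofList b) : a = b := by
  have := congrArg String.toList h
  simpa using this

theorem pyGetD_cons2 {α : Type} (a b c d : α) (tl : List α) : PySem.List.pyGetD (a::b::c::tl) 2 d = c := by
  simpa using PySem.List.pyGetD_ofNat (a::b::c::tl) 2 d (by simp)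

theorem pyGetD_cons1 {α : Type} (a b d : α) (tl : List α) : PySem.List.pyGetD (a::b::tl) 1 d = b := by
  simpa using PySem.List.pyGetD_ofNat (a::b::tl) 1 d (by simp)

theorem pyGetD_cons0 {α : Type} (a d : α) (tl : List α) : PySem.List.pyGetD (a::tl) 0 d = a := by
  simpa using PySem.List.pyGetD_ofNat (a::tl) 0 d (by simp)

theorem slice4 (L : List Char) : PySem.List.slice L (some 4) none = List.drop 4 L := by
  rw [PySem.List.slice_from L (a := 4) (by norm_num)]; rfl

theorem slice1 (L : List Char) : PySem.List.slice L (some 1) none = List.drop 1 L := by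
  rw [PySem.List.slice_from L (a := 1) (by norm_num)]; rfl

theorem ofList_beq (a b : List Char) : (String.ofList a == String.ofList b) = (a == b) := by
  by_cases h : a = b
  · simp [h]
  · have h2 : String.ofList a ≠ String.ofList b := fun hh => h (ofList_inj hh)
    simp [h, h2]

theorem sw_takeWhile (u : List Char) (w : String) (hw : '.' ∉ w.toList) :
    PySem.Str.startswith (String.ofList u) w
      = PySem.Str.startswith (String.ofList (u.takeWhile (fun x => !decide (x = '.')))) w := by
  simp only [PySem.Str.startswith, String.toList_ofList]
  rw [Bool.eq_iff_iff, PySem.Chars.startswith_iff, PySem.Chars.startswith_iff]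
  exact prefix_takeWhile _ hw u

theorem ab_agree (rel_path : String) : is_env_file_py rel_path = is_env_file_py_alt rel_path := by
  simp only [is_env_file_py, is_env_file_py_alt]
  generalize PySem.List.pyGetD ((PySem.Str.split? rel_path "/").getD []) (-1) "" = b
  have hfix : ∀ c ∈ (PySem.Str.lower b).toList, PySem.Chars.lowerChar c = c := by
    rw [PySem.Str.toList_lower]; exact lower_fixed _
  generalize (PySem.Str.lower b) = s at hfix ⊢
  obtain ⟨L, rfl⟩ : ∃ L, s = String.ofList L := ⟨s.toList, String.ofList_toList.symm⟩
  rw [String.toList_ofList] at hfix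
  rw [parts_eq, String.toList_ofList]
  have e1 : (".env" : String).toList = ['.','e','n','v'] := by decide
  have hslice : PySem.Str.slice (String.ofList L) (some 4) none = String.ofList (L.drop 4) := by
    simp [PySem.Str.slice, String.toList_ofList, slice4]
  by_cases hpre : ['.','e','n','v'] <+: L
  · -- filename starts with ".env"
    obtain ⟨r, rfl⟩ := hpre
    have hsw : PySem.Str.startswith (String.ofList (['.','e','n','v'] ++ r)) ".env" = true := by
      simp [PySem.Str.startswith, e1, PySem.Chars.startswith_iff]
    rw [hsw, hslice]
    have hdrop : (['.','e','n','v'] ++ r).drop 4 = r := by simp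
    rw [hdrop]
    rcases r with _ | ⟨c, u⟩
    · -- filename is exactly ".env"
      have hms : mySplit ['.','e','n','v'] = [[], ['e','n','v']] := by
        have := mySplit_no_dot ['e','n','v'] (by decide)
        simp [mySplit, this, mapHd]
      simp [hms, pyGetD_cons0, pyGetD_cons1]
    · by_cases hc : c = '.'
      · -- ".env.<suffix>"
        subst hc
        obtain ⟨tl, htl⟩ := mySplit_head u
        have hms : mySplit (['.','e','n','v'] ++ '.' :: u)
            = [] :: ['e','n','v'] :: (u.takeWhile (fun x => !decide (x = '.'))) :: tl := by
          have h2 : mySplit ('e' :: 'n' :: 'v' :: '.' :: u) = ['e','n','v'] :: mySplit u :=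
            mySplit_pre_dot ['e','n','v'] u (by decide)
          simp [mySplit, h2, htl, mapHd]
        have hne : String.ofList ('.' :: u) ≠ "" := by
          rw [Ne, ofList_eq_empty_iff]; simp
        have hswdot : PySem.Str.startswith (String.ofList ('.' :: u)) "." = true := by
          simp [PySem.Str.startswith, PySem.Chars.startswith_iff,
            show ("." : String).toList = ['.'] from by decide, List.cons_prefix_cons]
        have hsl1 : PySem.Str.slice (String.ofList ('.' :: u)) (some 1) none
            = String.ofList u := by
          simp [PySem.Str.slice, String.toList_ofList, slice1]
        have hlow : PySem.Str.lower (String.ofList u) = String.ofList u := by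
          have : PySem.Chars.lower u = u :=
            lower_of_fixed u (fun c hc => hfix c (by simp [hc]))
          simp [PySem.Str.lower, String.toList_ofList, this]
        rw [hms]
        simp only [hne, hswdot, if_pos, hsl1, hlow, List.any_cons, List.any_nil,
          pyGetD_cons0, pyGetD_cons1, pyGetD_cons2, List.map_cons, List.length_cons]
        rw [sw_takeWhile u "example" (by decide), sw_takeWhile u "sample" (by decide),
          sw_takeWhile u "template" (by decide)]
        simp [Bool.and_assoc]
      · -- ".env<something-not-a-dot>"
        obtain ⟨tl, htl⟩ := mySplit_head u
        have hms : mySplit (['.','e','n','v'] ++ c :: u)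
            = [] :: ('e' :: 'n' :: 'v' :: c :: u.takeWhile (fun x => !decide (x = '.'))) :: tl := by
          simp [mySplit, hc, htl, mapHd]
        have hne : String.ofList (c :: u) ≠ "" := by
          rw [Ne, ofList_eq_empty_iff]; simp
        have hswdot : PySem.Chars.startswith (c :: u) ['.'] = false := by
          rw [Bool.eq_false_iff, Ne, PySem.Chars.startswith_iff]
          simp [List.cons_prefix_cons]
          exact fun h => hc h.symm
        have henv : (String.ofList ('e' :: 'n' :: 'v' :: c :: u.takeWhile (fun x => !decide (x = '.'))) != "env") = true := by
          rw [show ("env" : String) = String.ofList ['e','n','v'] from rfl, bne, ofList_beq]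
          simp
        rw [hms]
        simp [hne, hswdot, henv, pyGetD_cons1]
  · -- filename does not start with ".env"
    have hsw : PySem.Str.startswith (String.ofList L) ".env" = false := by
      simp only [PySem.Str.startswith, String.toList_ofList, e1]
      rw [Bool.eq_false_iff, Ne]
      rw [PySem.Chars.startswith_iff]
      exact hpre
    rw [hsw]
    rcases L with _ | ⟨c, t⟩
    · simp [mySplit]
    · by_cases hc : c = '.'
      · subst hc
        have hnotenv : ¬ (['e','n','v'] <+: t) := fun h => hpre (by simp [List.cons_prefix_cons, h])
        obtain ⟨tl, htl⟩ := mySplit_head t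
        have hms : mySplit ('.' :: t) = [] :: (t.takeWhile (fun x => !decide (x = '.'))) :: tl := by
          simp [mySplit, htl]
        have henv : (String.ofList (t.takeWhile (fun x => !decide (x = '.'))) != "env") = true := by
          rw [show ("env" : String) = String.ofList ['e','n','v'] from rfl, bne, ofList_beq]
          simp only [Bool.not_eq_eq_eq_not, Bool.not_true, beq_eq_false_iff_ne, Ne]
          intro h
          exact hnotenv (h ▸ List.takeWhile_prefix _)
        rw [hms]
        simp [henv, pyGetD_cons1]
      · obtain ⟨tl, htl⟩ := mySplit_head (c :: t)
        rw [List.takeWhile_cons_of_pos (by simpa using hc)] at htl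
        have h0 : (String.ofList (c :: t.takeWhile (fun x => !decide (x = '.'))) != "") = true := by
          rw [show ("" : String) = String.ofList [] from rfl, bne, ofList_beq]
          simp
        rw [htl]
        simp [h0]

-- ===== VERDICT (by name: the statement is the Claim_ definition above) =====
theorem is_env_file_py_spec : Claim_equal_is_env_file_py := by
  intro rel_path _
  unfold Spec_is_env_file_py
  exact ab_agree rel_path
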